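-- pv_equiv track=rewrite | github.com/derpachu/Python-Code-2014-2015 | CSE python programs/projects/proj06_stringlib.py | find_chr
-- ===== SOURCE A (Python) =====
-- def find_chr(x,y):
--     x_list = []#same strategy as above
--     place = 0
--     fail = -1#addes it to return if not found
--     for char in x:
--         x_list.append(char)#loads x into a list format
--     if y =="":
--         return fail#default fails if blank
--     else:
--         for letter in x_list:
--             if letter == y:#checks every letter to see if it
--                 #matches what to look for
--                 place = x_list.index(letter)#finds the locaton
--                 return place
--                 break#to prevent it find the same letter further down
--         if place == 0:#if it gets to the end without finding it it exits
--             return fail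
-- ===== SOURCE B (Python) =====
-- def find_chr(x, y):
--     # Build a first-occurrence index table in one pass, then a single lookup.
--     table = {}
--     for i, ch in enumerate(x):
--         if ch not in table:
--             table[ch] = i
--     return table.get(y, -1)
-- ===== Notes on version B (the rewrite author's own statement) =====
-- stated objective: alternative
-- what changed: Replaces A's scan-then-list.index strategy (and its explicit empty-string branch) with a one-pass first-occurrence index table built over enumerate(x), followed by a single dict lookup with default -1.
import Mathlib
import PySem

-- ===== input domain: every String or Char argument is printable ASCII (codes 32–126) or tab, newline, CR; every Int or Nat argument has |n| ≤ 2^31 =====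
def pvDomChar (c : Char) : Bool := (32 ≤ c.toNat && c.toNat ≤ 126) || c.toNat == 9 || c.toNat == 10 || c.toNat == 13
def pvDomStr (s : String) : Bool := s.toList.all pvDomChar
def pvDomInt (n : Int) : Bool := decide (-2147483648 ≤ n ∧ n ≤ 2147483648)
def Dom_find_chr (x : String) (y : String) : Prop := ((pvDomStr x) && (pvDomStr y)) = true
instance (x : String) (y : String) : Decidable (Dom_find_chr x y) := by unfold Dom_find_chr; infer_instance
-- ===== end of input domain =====

-- B replaces A's scan + list.index with a one-pass first-occurrence index table and a single lookup (alternative decomposition, not claimed faster).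


-- ===== PORT A =====
-- the 'for letter in x_list' loop; Python chars are 1-char strings, so 'letter == y' is String.ofList [c] = y.
-- x_list.index(letter) cannot fail there (letter ∈ x_list), so the Option is unwrapped with getD 0.
def findChrLoopA (full : List Char) (rest : List Char) (y : String) : Int :=
  match rest with
  | [] => -1      -- after the loop 'place' is still 0, so A returns fail = -1
  | c :: t =>
      if String.ofList [c] = y then ((PySem.List.index? full c).getD 0 : Nat)
      else findChrLoopA full t y

def find_chr (x : String) (y : String) : Int :=
  let x_list := x.toList      -- the first loop loads x into a list
  if y = "" then -1
  else findChrLoopA x_list x_list y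

-- ===== PORT B =====
def find_chr_alt (x : String) (y : String) : Int :=
  let table := (PySem.List.enumerate x.toList 0).foldl
    (fun d p => if d.contains (String.ofList [p.2]) then d else d.insert (String.ofList [p.2]) p.1)
    PySem.Dict.empty
  table.getD y (-1)

-- ===== PRECONDITION & SPEC =====
def Spec_find_chr (x : String) (y : String) (out : Int) : Prop := out = find_chr_alt x y
instance (x : String) (y : String) (out : Int) : Decidable (Spec_find_chr x y out) := by unfold Spec_find_chr; infer_instance

-- ===== CLAIM (what is proved, stated in full; the proofs are below) =====
def Claim_equal_find_chr : Prop := ∀ (x : String) (y : String), Dom_find_chr x y → Spec_find_chr x y (find_chr x y)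

-- ===== LEMMAS AND PROOFS =====

-- common spec: index (starting at n) of the first char of xs whose 1-char string equals y, else -1
def scanIdx (xs : List Char) (y : String) (n : Int) : Int :=
  match xs with
  | [] => -1
  | c :: t => if String.ofList [c] = y then n else scanIdx t y (n + 1)

theorem singleton_ne_empty (c : Char) : String.ofList [c] ≠ "" := by
  intro h
  have := congrArg String.toList h
  simp at this

theorem index?_first (pre suf : List Char) (c : Char) (h : c ∉ pre) :
    PySem.List.index? (pre ++ c :: suf) c = some pre.length := by
  induction pre with
  | nil => simpa using PySem.List.index?_cons_self c suf
  | cons a t ih =>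
      have hac : a ≠ c := by intro he; exact h (by simp [he])
      have ht : c ∉ t := fun hm => h (by simp [hm])
      rw [List.cons_append, PySem.List.index?_cons_of_ne _ hac, ih ht]
      simp

theorem loopA_eq_scan (y : String) :
    ∀ (rest pre : List Char), (∀ c ∈ pre, String.ofList [c] ≠ y) →
      findChrLoopA (pre ++ rest) rest y = scanIdx rest y pre.length := by
  intro rest
  induction rest with
  | nil => intro pre _; simp [findChrLoopA, scanIdx]
  | cons c t ih =>
      intro pre hpre
      by_cases hc : String.ofList [c] = y
      · have hcp : c ∉ pre := fun hm => hpre c hm hc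
        unfold findChrLoopA
        rw [if_pos hc, index?_first pre t c hcp]
        simp [scanIdx, hc]
      · have h1 : ∀ d ∈ pre ++ [c], String.ofList [d] ≠ y := by
          intro d hd
          rcases List.mem_append.mp hd with h | h
          · exact hpre d h
          · simp at h; subst h; exact hc
        have := ih (pre ++ [c]) h1
        simpa [findChrLoopA, scanIdx, hc, List.append_assoc] using this

theorem buildB_getD (y : String) :
    ∀ (xs : List Char) (n : Int) (d : PySem.Dict String Int),
      ((PySem.List.enumerate xs n).foldl
        (fun d p => if d.contains (String.ofList [p.2]) then d
                    else d.insert (String.ofList [p.2]) p.1) d).getD y (-1)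
      = match d.get? y with
        | some v => v
        | none => scanIdx xs y n := by
  intro xs
  induction xs with
  | nil =>
      intro n d
      cases h : d.get? y <;>
        simp [PySem.List.enumerate, scanIdx, PySem.Dict.getD_eq_get?_getD, h]
  | cons c t ih =>
      intro n d
      rw [PySem.List.enumerate_cons]
      simp only [List.foldl_cons]
      by_cases hc : String.ofList [c] = y
      · subst hc
        by_cases hcon : d.contains (String.ofList [c]) = true
        · have hsome : ∃ v, d.get? (String.ofList [c]) = some v := by
            have := PySem.Dict.contains_eq_isSome_get? d (String.ofList [c])
            rw [hcon] at this
            exact Option.isSome_iff_exists.mp this.symm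
          obtain ⟨v, hv⟩ := hsome
          simp only [hcon, if_true]
          rw [ih (n+1) d, hv]
      
        · simp only [hcon, Bool.false_eq_true, if_false]
          have hcon' : d.contains (String.ofList [c]) = false := by
            simpa using hcon
          have hnone : d.get? (String.ofList [c]) = none := by
            have := PySem.Dict.contains_eq_isSome_get? d (String.ofList [c])
            rw [hcon'] at this
            exact Option.not_isSome_iff_eq_none.mp (by simp [← this])
          rw [ih (n+1) _, PySem.Dict.get?_insert_self]
          simp [scanIdx, hnone]
      · have hget : (if d.contains (String.ofList [c]) then d
                     else d.insert (String.ofList [c]) n).get? y = d.get? y := by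
          split
          · rfl
          · exact PySem.Dict.get?_insert_of_ne _ _ (fun h => hc h.symm)
        rw [ih (n+1) _, hget]
        cases h : d.get? y <;> simp [scanIdx, hc]

theorem scanIdx_empty : ∀ (xs : List Char) (n : Int), scanIdx xs "" n = -1 := by
  intro xs
  induction xs with
  | nil => intro n; simp [scanIdx]
  | cons c t ih => intro n; simp [scanIdx, singleton_ne_empty c, ih]

theorem find_chr_alt_eq_scan (x : String) (y : String) :
    find_chr_alt x y = scanIdx x.toList y 0 := by
  unfold find_chr_alt
  rw [buildB_getD y x.toList 0 PySem.Dict.empty]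
  simp [PySem.Dict.get?_empty]

-- ===== VERDICT (by name: the statement is the Claim_ definition above) =====
theorem find_chr_spec : Claim_equal_find_chr := by
  intro x y _
  unfold Spec_find_chr
  rw [find_chr_alt_eq_scan]
  unfold find_chr
  by_cases hy : y = ""
  · simp [hy, scanIdx_empty]
  · simp only [hy, if_false]
    have := loopA_eq_scan y x.toList [] (by simp)
    simpa using this
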